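-- pv_equiv track=rewrite | github.com/yejoon90417-design/nonogram-arena-app | solve_and_insert.py | filter_patterns_by_known
-- ===== SOURCE A (Python) =====
-- def filter_patterns_by_known(patterns, known):
--     # known: list of -1/0/1
--     out = []
--     for p in patterns:
--         ok = True
--         for i, kv in enumerate(known):
--             if kv != -1 and p[i] != kv:
--                 ok = False
--                 break
--         if ok:
--             out.append(p)
--     return out
-- ===== SOURCE B (Python) =====
-- def filter_patterns_by_known(patterns, known):
--     # constraint-major: successively narrow the candidate list, one constrained cell at a time
--     candidates = patterns
--     for i, kv in enumerate(known):
--         if kv != -1: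
--             candidates = [p for p in candidates if p[i] == kv]
--     return candidates
-- ===== Notes on version B (the rewrite author's own statement) =====
-- stated objective: alternative
-- what changed: B inverts the loop nesting: instead of A's pattern-major scan (for each pattern, re-scan all of known with an ok flag and break), B runs constraint-major staged filtering - for each constrained cell of known it rebuilds the surviving candidate list in one comprehension, so the pattern list is narrowed pass by pass and no per-pattern flag/break logic exists; Pre_ excludes exactly the inputs where both programs raise IndexError (a constrained index out of range of some pattern, reached before any in-range constrained mismatch).
import Mathlib
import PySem

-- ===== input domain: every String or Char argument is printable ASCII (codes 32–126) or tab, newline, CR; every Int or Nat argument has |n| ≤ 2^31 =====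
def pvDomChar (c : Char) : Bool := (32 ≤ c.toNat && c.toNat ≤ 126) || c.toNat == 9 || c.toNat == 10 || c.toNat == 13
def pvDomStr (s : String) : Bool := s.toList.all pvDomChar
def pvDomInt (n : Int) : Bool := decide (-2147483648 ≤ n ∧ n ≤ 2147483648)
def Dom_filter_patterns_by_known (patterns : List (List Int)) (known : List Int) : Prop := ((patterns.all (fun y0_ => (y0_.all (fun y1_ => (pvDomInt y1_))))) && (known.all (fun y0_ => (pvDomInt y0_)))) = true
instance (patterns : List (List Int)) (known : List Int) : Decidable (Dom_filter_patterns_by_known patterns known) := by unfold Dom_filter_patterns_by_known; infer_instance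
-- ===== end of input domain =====

-- B inverts the loop nesting: constraint-major staged filtering (narrow the candidate list once per
-- constrained cell of `known`) instead of A's pattern-major scan with an ok flag and break; same cost class.

-- ===== PORT A =====
-- inner 'for i, kv in enumerate(known): if kv != -1 and p[i] != kv: ok = False; break'
-- (p[i] out of range → Python raises IndexError; the port returns false there, outside Pre_)
def pvCheckA (p : List Int) : List Int → Int → Bool
  | [], _ => true
  | kv :: rest, i =>
      if kv != -1 && (PySem.List.pyGet? p i != some kv) then false
      else pvCheckA p rest (i + 1)

def filter_patterns_by_known (patterns : List (List Int)) (known : List Int) : List (List Int) :=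
  patterns.foldl (fun out p => if pvCheckA p known 0 then out ++ [p] else out) []

-- ===== PORT B =====
-- 'for i, kv in enumerate(known): if kv != -1: candidates = [p for p in candidates if p[i] == kv]'
def filter_patterns_by_known_alt (patterns : List (List Int)) (known : List Int) : List (List Int) :=
  (PySem.List.enumerate known).foldl
    (fun cands ikv =>
      if ikv.2 != -1 then cands.filter (fun p => PySem.List.pyGet? p ikv.1 == some ikv.2)
      else cands)
    patterns

-- ===== PRECONDITION & SPEC =====
-- Pre_ excludes exactly the inputs on which Python A (and B alike) raises IndexError:
-- some pattern p has a constrained index i out of its range that is reached, i.e. not preceded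
-- by a constrained in-range mismatch at which the scan over p's constraints stops first.
def Pre_filter_patterns_by_known (patterns : List (List Int)) (known : List Int) : Prop :=
  ∀ p ∈ patterns, ∀ i < known.length, known[i]! ≠ -1 → p.length ≤ i →
    ∃ j < i, known[j]! ≠ -1 ∧ j < p.length ∧ p[j]! ≠ known[j]!
instance (patterns : List (List Int)) (known : List Int) : Decidable (Pre_filter_patterns_by_known patterns known) := by
  unfold Pre_filter_patterns_by_known; infer_instance

def pvWitness_filter_patterns_by_known : List (List Int) × List Int :=
  ([[1, 0], [0, 1], [1, 1]], [1, -1])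

def Spec_filter_patterns_by_known (patterns : List (List Int)) (known : List Int) (out : List (List Int)) : Prop := out = filter_patterns_by_known_alt patterns known
instance (patterns : List (List Int)) (known : List Int) (out : List (List Int)) : Decidable (Spec_filter_patterns_by_known patterns known out) := by unfold Spec_filter_patterns_by_known; infer_instance

-- ===== CLAIM (what is proved, stated in full; the proofs are below) =====
def Claim_equal_filter_patterns_by_known : Prop := ∀ (patterns : List (List Int)) (known : List Int), Dom_filter_patterns_by_known patterns known → Pre_filter_patterns_by_known patterns known → Spec_filter_patterns_by_known patterns known (filter_patterns_by_known patterns known)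

-- ===== LEMMAS AND PROOFS =====

-- A's flag-and-break scan of known equals one all() over the constrained (index,value) pairs
-- (both short-circuit at the first failing constrained index, so they agree even where both raise).
theorem pvCheckA_eq (p : List Int) (known : List Int) (i : Int) :
    pvCheckA p known i =
      ((PySem.List.enumerate known i).filter (fun ikv => ikv.2 != -1)).all
        (fun ikv => PySem.List.pyGet? p ikv.1 == some ikv.2) := by
  induction known generalizing i with
  | nil => simp [pvCheckA, PySem.List.enumerate_nil]
  | cons kv rest ih =>
      rw [pvCheckA, PySem.List.enumerate_cons]
      by_cases h : kv = -1
      · simp [h, ih]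
      · by_cases hg : PySem.List.pyGet? p i = some kv
        · simp [h, hg, ih, -List.all_filter]
        · simp [h, hg]

-- B's staged narrowing over any constraint list equals one filter by the conjunction of its
-- constrained tests (successive filters commute into a single all()).
theorem foldl_filter_stages (cs : List (Int × Int)) (xs : List (List Int)) :
    cs.foldl
      (fun cands ikv =>
        if ikv.2 != -1 then cands.filter (fun p => PySem.List.pyGet? p ikv.1 == some ikv.2)
        else cands) xs
    = xs.filter (fun p => (cs.filter (fun ikv => ikv.2 != -1)).all
        (fun ikv => PySem.List.pyGet? p ikv.1 == some ikv.2)) := by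
  induction cs generalizing xs with
  | nil => simp
  | cons c rest ih =>
      rw [List.foldl_cons]
      by_cases h : c.2 = -1
      · rw [if_neg (by simp [h]), ih, List.filter_cons_of_neg (by simp [h])]
      · rw [if_pos (by simp [h]), ih, List.filter_cons_of_pos (by simp [h]), List.filter_filter]
        refine List.filter_congr (fun p _ => ?_)
        simp [List.all_cons, Bool.and_comm]

theorem filter_patterns_by_known_spec : Claim_equal_filter_patterns_by_known := by
  intro patterns known _ _
  unfold Spec_filter_patterns_by_known filter_patterns_by_known filter_patterns_by_known_alt
  rw [PySem.List.foldl_append_if_eq_filter, List.nil_append, foldl_filter_stages]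
  exact List.filter_congr (fun p _ => by rw [pvCheckA_eq])
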